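-- pv_equiv track=rewrite | github.com/sshussh/text-gauntlet | TG/main.py | CleanLyrics
-- ===== SOURCE A (Python) =====
-- from typing import List, Dict, Optional, Any, Callable, Literal, Sequence
--
-- Lyrics = str | Literal[True]
--
-- def CleanLyrics(lyrics: Lyrics) -> str:
--     lyricsList: List[str] = lyrics.split("\n")  # type: ignore
--     del lyricsList[0]
--     lyricsClean = " ".join(
--         [line for line in lyricsList if not line.startswith("[") or line != ""]
--     )
--     lyricsClean = lyricsClean[:-8]
--     return lyricsClean
-- ===== SOURCE B (Python) =====
-- def CleanLyrics(lyrics):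
--     # one pass over the characters: skip up to and including the first newline,
--     # then emit each char with later newlines turned into spaces; finally drop
--     # the last 8 emitted chars.
--     out = []
--     seen = False
--     for ch in lyrics:
--         if seen:
--             out.append(" " if ch == "\n" else ch)
--         elif ch == "\n":
--             seen = True
--     return "".join(out[:len(out) - 8]) if len(out) > 8 else ""
-- ===== Notes on version B (the rewrite author's own statement) =====
-- stated objective: alternative
-- what changed: A splits the text into a line list, deletes index 0, runs an always-true comprehension filter, joins with spaces and slices [:-8]; B is a single character-level state-machine pass with a boolean flag and an accumulator (no split/join/slice string operations), trimming by length arithmetic at the end.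
import Mathlib
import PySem

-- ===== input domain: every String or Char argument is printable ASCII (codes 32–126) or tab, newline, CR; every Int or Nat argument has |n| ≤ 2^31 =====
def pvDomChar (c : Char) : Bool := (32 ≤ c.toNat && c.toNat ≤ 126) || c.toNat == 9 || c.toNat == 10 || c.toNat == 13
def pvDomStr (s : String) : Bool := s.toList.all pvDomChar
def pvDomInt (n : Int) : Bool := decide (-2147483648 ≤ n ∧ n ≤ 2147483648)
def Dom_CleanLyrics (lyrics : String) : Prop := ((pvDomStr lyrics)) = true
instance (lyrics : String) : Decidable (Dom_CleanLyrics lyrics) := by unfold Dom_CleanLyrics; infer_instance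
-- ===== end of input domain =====

-- B replaces A's split/delete/filter/join/slice pipeline by a single character-level
-- state-machine pass (boolean flag + accumulator) with a length-arithmetic trim;
-- objective: alternative (same cost, different algorithmic decomposition).

-- ===== PORT A =====
def CleanLyrics (lyrics : String) : String :=
  -- lyricsList = lyrics.split("\n"); sep "\n" ≠ "" so split? is always `some`
  let lyricsList : List String := (PySem.Str.split? lyrics "\n").getD []
  -- del lyricsList[0]: split(sep) never returns an empty list, so this is exactly .tail
  let lyricsList := lyricsList.tail
  let lyricsClean := PySem.Str.join " "
    (lyricsList.filter (fun line => !PySem.Str.startswith line "[" || line != ""))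
  PySem.Str.slice lyricsClean none (some (-8))

-- ===== PORT B =====
-- the for-loop of Source B as structural recursion over the characters, state = seen flag
def pvScan : Bool → List Char → List Char
  | _, [] => []
  | true, c :: t => (if c = '\n' then ' ' else c) :: pvScan true t
  | false, c :: t => if c = '\n' then pvScan true t else pvScan false t

def CleanLyrics_alt (lyrics : String) : String :=
  let out := pvScan false lyrics.toList
  if out.length > 8 then String.ofList (out.take (out.length - 8)) else ""

-- ===== PRECONDITION & SPEC =====
def Spec_CleanLyrics (lyrics : String) (out : String) : Prop := out = CleanLyrics_alt lyrics
instance (lyrics : String) (out : String) : Decidable (Spec_CleanLyrics lyrics out) := by unfold Spec_CleanLyrics; infer_instance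

-- ===== CLAIM (what is proved, stated in full; the proofs are below) =====
def Claim_equal_CleanLyrics : Prop := ∀ (lyrics : String), Dom_CleanLyrics lyrics → Spec_CleanLyrics lyrics (CleanLyrics lyrics)

-- ===== LEMMAS AND PROOFS =====

-- structural specification of s.split("\n")
def pvSplit : List Char → List (List Char)
  | [] => [[]]
  | c :: t =>
    if c = '\n' then [] :: pvSplit t
    else
      match pvSplit t with
      | p :: ps => (c :: p) :: ps
      | [] => [[c]]

lemma pvSplit_ne_nil (l : List Char) : pvSplit l ≠ [] := by
  cases l with
  | nil => simp [pvSplit]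
  | cons c t =>
    simp only [pvSplit]
    split
    · simp
    · cases h : pvSplit t <;> simp

lemma splitOn_go_eq (fuel : Nat) (l cur : List Char) (acc : List (List Char))
    (hf : l.length < fuel) :
    PySem.Chars.splitOn.go ['\n'] fuel l cur acc =
      acc.reverse ++
        (match pvSplit l with
         | p :: ps => (cur.reverse ++ p) :: ps
         | [] => []) := by
  induction fuel generalizing l cur acc with
  | zero => omega
  | succ fuel ih =>
    cases l with
    | nil => simp [PySem.Chars.splitOn.go, pvSplit]
    | cons c t =>
      by_cases hc : c = '\n'
      · subst hc
        have hpre : List.isPrefixOf ['\n'] ('\n' :: t) = true := by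
          simp [List.isPrefixOf]
        rw [PySem.Chars.splitOn.go, if_pos hpre]
        simp only [List.length_cons] at hf
        rw [show List.drop ['\n'].length ('\n' :: t) = t from rfl]
        rw [ih t [] (cur.reverse :: acc) (by omega)]
        cases hsp : pvSplit t with
        | nil => exact absurd hsp (pvSplit_ne_nil t)
        | cons p ps => simp [pvSplit, hsp]
      · have hpre : List.isPrefixOf ['\n'] (c :: t) = false := by
          simp [List.isPrefixOf]
          exact fun h => absurd h.symm hc
        rw [PySem.Chars.splitOn.go, if_neg (by simp [hpre])]
        simp only [List.length_cons] at hf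
        rw [ih t (c :: cur) acc (by omega)]
        cases hsp : pvSplit t with
        | nil => exact absurd hsp (pvSplit_ne_nil t)
        | cons p ps => simp [pvSplit, hc, hsp]

lemma splitOn_newline (cs : List Char) :
    PySem.Chars.splitOn cs ['\n'] = pvSplit cs := by
  rw [PySem.Chars.splitOn, splitOn_go_eq (cs.length + 1) cs [] [] (by omega)]
  cases h : pvSplit cs with
  | nil => exact absurd h (pvSplit_ne_nil cs)
  | cons p ps => simp

-- the newline → space character map that B's emitting phase performs
def pvNl (c : Char) : Char := if c = '\n' then ' ' else c

-- joining ALL the split pieces with spaces is the character map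
lemma join_pvSplit (cs : List Char) :
    PySem.Chars.join [' '] (pvSplit cs) = cs.map pvNl := by
  induction cs with
  | nil => simp [pvSplit, PySem.Chars.join_singleton]
  | cons c t ih =>
    by_cases hc : c = '\n'
    · subst hc
      rw [show pvSplit ('\n' :: t) = [] :: pvSplit t from by simp [pvSplit]]
      cases hsp : pvSplit t with
      | nil => exact absurd hsp (pvSplit_ne_nil t)
      | cons p ps =>
        rw [PySem.Chars.join_cons_cons, ← hsp, ih]
        simp [pvNl]
    · simp only [pvSplit, if_neg hc]
      cases hsp : pvSplit t with
      | nil => exact absurd hsp (pvSplit_ne_nil t)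
      | cons p ps =>
        cases ps with
        | nil =>
          rw [PySem.Chars.join_singleton]
          rw [hsp, PySem.Chars.join_singleton] at ih
          simp [ih, pvNl, hc]
        | cons q qs =>
          rw [PySem.Chars.join_cons_cons]
          rw [hsp, PySem.Chars.join_cons_cons] at ih
          simp only [List.cons_append, List.append_assoc, List.map_cons] at ih ⊢
          rw [ih]
          simp [pvNl, hc]

-- B's emitting phase (seen = true) is the character map
lemma pvScan_true (cs : List Char) : pvScan true cs = cs.map pvNl := by
  induction cs with
  | nil => simp [pvScan]
  | cons c t ih => simp [pvScan, ih, pvNl]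

-- the core identity: joining the tail of the split = B's full scan
lemma join_tail_pvSplit (cs : List Char) :
    PySem.Chars.join [' '] (pvSplit cs).tail = pvScan false cs := by
  induction cs with
  | nil => simp [pvSplit, pvScan, PySem.Chars.join_nil]
  | cons c t ih =>
    by_cases hc : c = '\n'
    · subst hc
      simp only [pvSplit, pvScan, reduceIte, List.tail_cons]
      rw [pvScan_true]
      exact join_pvSplit t
    · simp only [pvSplit, pvScan, if_neg hc]
      cases hsp : pvSplit t with
      | nil => exact absurd hsp (pvSplit_ne_nil t)
      | cons p ps =>
        rw [hsp] at ih
        simpa using ih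

-- A's comprehension filter keeps every line
lemma filter_pred_true (line : String) :
    (!PySem.Str.startswith line "[" || line != "") = true := by
  by_cases h : line = ""
  · subst h; decide
  · simp [h]

theorem pv_main : ∀ (lyrics : String), CleanLyrics lyrics = CleanLyrics_alt lyrics := by
  intro lyrics
  simp only [CleanLyrics, CleanLyrics_alt]
  set out := pvScan false lyrics.toList with hout
  have hB : (if out.length > 8 then String.ofList (out.take (out.length - 8)) else "") =
      String.ofList (out.take (out.length - 8)) := by
    split
    · rfl
    · rename_i h
      rw [show out.length - 8 = 0 from by omega, List.take_zero]
  rw [hB]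
  apply String.toList_inj.mp
  rw [PySem.Str.toList_slice, String.toList_ofList]
  rw [PySem.Chars.slice_eq_listSlice, PySem.List.slice_to_neg_ofNat _ 8 (by omega)]
  refine congrArg (fun (l : List Char) => l.take (l.length - 8)) ?_
  rw [PySem.Str.toList_join]
  have hsep : ("\n".toList) = ['\n'] := by decide
  have hsp : ((" ").toList) = [' '] := by decide
  have hsplit : PySem.Str.split? lyrics "\n" =
      some ((PySem.Chars.splitOn lyrics.toList ['\n']).map String.ofList) := by
    have hb := PySem.Str.split?_map lyrics "\n"
    rw [hsep] at hb
    rw [show PySem.Chars.split? lyrics.toList ['\n'] =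
        some (PySem.Chars.splitOn lyrics.toList ['\n']) from by
      rw [PySem.Chars.split?, if_neg (by simp)]] at hb
    cases h : PySem.Str.split? lyrics "\n" with
    | none => rw [h] at hb; simp at hb
    | some parts =>
      rw [h] at hb
      simp only [Option.map_some, Option.some.injEq] at hb ⊢
      rw [← hb, List.map_map]
      simp [Function.comp_def]
  rw [hsplit]
  simp only [Option.getD_some]
  rw [List.filter_eq_self.mpr (fun line _ => filter_pred_true line)]
  rw [← List.map_tail, List.map_map,
    show String.toList ∘ String.ofList = id from funext (fun l => String.toList_ofList),
    List.map_id]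
  rw [splitOn_newline, hsp, join_tail_pvSplit]

-- ===== VERDICT (by name: the statement is the Claim_ definition above) =====
theorem CleanLyrics_spec : Claim_equal_CleanLyrics := by
  intro lyrics _
  unfold Spec_CleanLyrics
  exact pv_main lyrics
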